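-- pv_equiv track=rewrite | github.com/DaDaMrX/jddc-datacleaning | data.py | _index_seperation
-- ===== SOURCE A (Python) =====
-- def _index_seperation(conversation_list):
--     """
--     得到每句话的隶属情况，用索引来代表句子
--     :param conversation_list: 第二种x或者第三种当前的输出
--     :return: 例如，[[0,1,2,3], [4,5,6,7,8], [9,10,11] ... ] 来表示0-3属于第一个对话，4-8属于第二个对话
--     """
--     output = []
--     count = 0
--     for conversation in conversation_list:
--         current_conversation = []
--         for sentence in conversation:
--             current_conversation.append(count)
--             count += 1
--         output.append(current_conversation)
--     return output
-- ===== SOURCE B (Python) =====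
-- def _index_seperation(conversation_list):
--     # Two-phase: measure lengths, build prefix-offset table, then lay out ranges.
--     lengths = [len(c) for c in conversation_list]
--     offsets = [0]
--     for l in lengths:
--         offsets.append(offsets[-1] + l)
--     return [list(range(s, s + l)) for s, l in zip(offsets, lengths)]
-- ===== Notes on version B (the rewrite author's own statement) =====
-- stated objective: alternative
-- what changed: Replaces the nested loops threading one running counter with a two-phase layout: a length pass, a prefix-sum offset table, and a range() per conversation built from its offset.
import Mathlib
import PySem

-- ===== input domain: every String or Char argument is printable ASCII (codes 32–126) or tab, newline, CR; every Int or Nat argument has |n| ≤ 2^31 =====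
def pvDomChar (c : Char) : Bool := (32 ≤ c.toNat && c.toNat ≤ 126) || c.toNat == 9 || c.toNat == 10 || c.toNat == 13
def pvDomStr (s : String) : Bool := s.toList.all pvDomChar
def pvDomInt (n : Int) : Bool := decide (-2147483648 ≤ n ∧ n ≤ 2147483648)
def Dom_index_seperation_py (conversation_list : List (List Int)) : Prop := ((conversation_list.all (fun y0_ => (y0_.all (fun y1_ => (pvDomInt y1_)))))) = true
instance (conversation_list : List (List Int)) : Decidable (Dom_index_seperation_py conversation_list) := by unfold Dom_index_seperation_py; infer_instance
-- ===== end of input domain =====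

-- B replaces A's nested loops threading a running counter by a two-phase layout (length pass, prefix-offset table, one range per conversation); same cost, alternative structure.

-- ===== PORT A =====
def index_seperation_py (conversation_list : List (List Int)) : List (List Int) :=
  (conversation_list.foldl
    (fun (st : List (List Int) × Int) conversation =>
      let inner := conversation.foldl
        (fun (cc : List Int × Int) _sentence => (cc.1 ++ [cc.2], cc.2 + 1)) ([], st.2)
      (st.1 ++ [inner.1], inner.2))
    ([], 0)).1

-- ===== PORT B =====
def index_seperation_py_alt (conversation_list : List (List Int)) : List (List Int) :=
  let lengths := conversation_list.map (fun c => (c.length : Int))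
  let offsets := lengths.foldl (fun (acc : List Int) l => acc ++ [acc.getLast! + l]) [0]
  (offsets.zip lengths).map (fun sl => PySem.List.pyRange sl.1 (sl.1 + sl.2) 1)

-- ===== PRECONDITION & SPEC =====
def Spec_index_seperation_py (conversation_list : List (List Int)) (out : List (List Int)) : Prop := out = index_seperation_py_alt conversation_list
instance (conversation_list : List (List Int)) (out : List (List Int)) : Decidable (Spec_index_seperation_py conversation_list out) := by unfold Spec_index_seperation_py; infer_instance

-- ===== CLAIM (what is proved, stated in full; the proofs are below) =====
def Claim_equal_index_seperation_py : Prop := ∀ (conversation_list : List (List Int)), Dom_index_seperation_py conversation_list → Spec_index_seperation_py conversation_list (index_seperation_py conversation_list)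

-- ===== LEMMAS AND PROOFS =====

-- common characterisation: groups of consecutive indices, the first starting at c
def pvGo (c : Int) : List (List Int) → List (List Int)
  | [] => []
  | conv :: rest => PySem.List.pyRange c (c + conv.length) 1 :: pvGo (c + conv.length) rest

-- the prefix-sum offset table as a recursive function
def pvOffs (c : Int) : List Int → List Int
  | [] => [c]
  | l :: ls => c :: pvOffs (c + l) ls

lemma inner_fold (conv : List Int) : ∀ (acc : List Int) (c : Int),
    conv.foldl (fun (cc : List Int × Int) _ => (cc.1 ++ [cc.2], cc.2 + 1)) (acc, c)
      = (acc ++ PySem.List.pyRange c (c + conv.length) 1, c + conv.length) := by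
  induction conv with
  | nil => intro acc c; simp [PySem.List.pyRange_one_eq_nil]
  | cons x rest ih =>
    intro acc c
    simp only [List.foldl_cons, ih]
    have hn : c + 1 + (rest.length : Int) = c + ((x :: rest).length : Int) := by
      simp only [List.length_cons]; push_cast; ring
    rw [hn]
    refine congrArg (fun t => (t, c + ((x :: rest).length : Int))) ?_
    have hpos : c < c + ((x :: rest).length : Int) := by
      have : (0 : Int) < ((x :: rest).length : Int) := by exact_mod_cast Nat.succ_pos rest.length
      omega
    conv_rhs => rw [PySem.List.pyRange_one_cons hpos]
    rw [List.append_assoc]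
    rfl

lemma outer_fold (cl : List (List Int)) : ∀ (out : List (List Int)) (c : Int),
    (cl.foldl
      (fun (st : List (List Int) × Int) conversation =>
        let inner := conversation.foldl
          (fun (cc : List Int × Int) _ => (cc.1 ++ [cc.2], cc.2 + 1)) ([], st.2)
        (st.1 ++ [inner.1], inner.2))
      (out, c))
      = (out ++ pvGo c cl, c + (cl.map (fun x => (x.length : Int))).sum) := by
  induction cl with
  | nil => intro out c; simp [pvGo]
  | cons conv rest ih =>
    intro out c
    simp only [List.foldl_cons]
    conv_lhs => rw [inner_fold]
    rw [ih]
    simp only [Prod.mk.injEq, pvGo]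
    refine ⟨by simp, by simp; ring⟩

lemma A_eq_go (cl : List (List Int)) : index_seperation_py cl = pvGo 0 cl := by
  unfold index_seperation_py
  rw [outer_fold]
  simp

lemma offs_fold (ls : List Int) : ∀ (init : List Int) (c : Int),
    ls.foldl (fun (acc : List Int) l => acc ++ [acc.getLast! + l]) (init ++ [c])
      = init ++ pvOffs c ls := by
  induction ls with
  | nil => intro init c; simp [pvOffs]
  | cons l rest ih =>
    intro init c
    simp only [List.foldl_cons]
    have h : (init ++ [c]).getLast! = c := by
      cases init with
      | nil => rfl
      | cons a as => simp [List.getLast!]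
    rw [h]
    have h2 : init ++ [c] ++ [c + l] = (init ++ [c]) ++ [c + l] := by simp
    rw [h2, ih (init ++ [c]) (c + l)]
    simp [pvOffs]

lemma zip_offs (cl : List (List Int)) : ∀ (c : Int),
    ((pvOffs c (cl.map (fun x => (x.length : Int)))).zip (cl.map (fun x => (x.length : Int)))).map
      (fun sl => PySem.List.pyRange sl.1 (sl.1 + sl.2) 1) = pvGo c cl := by
  induction cl with
  | nil => intro c; simp [pvOffs, pvGo]
  | cons conv rest ih =>
    intro c
    simp only [List.map_cons, pvOffs, List.zip_cons_cons, pvGo, ih]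

lemma B_eq_go (cl : List (List Int)) : index_seperation_py_alt cl = pvGo 0 cl := by
  have h0 : ([0] : List Int) = [] ++ [0] := rfl
  simp only [index_seperation_py_alt]
  rw [h0, offs_fold]
  simpa using zip_offs cl 0

-- ===== VERDICT (by name: the statement is the Claim_ definition above) =====
theorem index_seperation_py_spec : Claim_equal_index_seperation_py := by
  intro cl _
  unfold Spec_index_seperation_py
  rw [A_eq_go, B_eq_go]
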